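-- pv_equiv track=rewrite | github.com/EricPWilliamson/Codewars-algorithms | Solutions/roboscript1_cw.py | highlight
-- ===== SOURCE A (Python) =====
-- def get_color(cat):
--     #Generates the span style command for the color corresponding to cat.
--     if cat == "number":
--         return "<span style=\"color: orange\">"
--     elif cat == "F":
--         return "<span style=\"color: pink\">"
--     elif cat == "L":
--         return "<span style=\"color: red\">"
--     elif cat == "R":
--         return "<span style=\"color: green\">"
--     else:
--         return '' #!!What do brackets do?
--
-- def highlight(code):
--     # Implement your syntax highlighter here
--     output = ''
--     prev_cat = ''
--     for c in code:
--         ###Determine which category the character fits: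
--         if c.isdigit():
--             cat = "number"
--         else:
--             cat = c
--         ###Append the output string:
--         if cat == prev_cat:
--             #Just add this to the current command:
--             output += c
--         else:
--             if prev_cat in ['F','L','R','number']:
--                 #Close off the previous command:
--                 output += "</span>"
--             #Start next command:
--             output += get_color(cat) + c
--         prev_cat = str(cat)
--     #Close off the last command:
--     output += "</span>"
--     return output
-- ===== SOURCE B (Python) =====
-- def get_color(cat):
--     #Generates the span style command for the color corresponding to cat.
--     if cat == "number":
--         return "<span style=\"color: orange\">"
--     elif cat == "F":
--         return "<span style=\"color: pink\">"
--     elif cat == "L":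
--         return "<span style=\"color: red\">"
--     elif cat == "R":
--         return "<span style=\"color: green\">"
--     else:
--         return ''
--
-- def _cat(c):
--     return "number" if c.isdigit() else c
--
-- def highlight(code):
--     # Run-based highlighter: split the code into maximal runs of one category
--     # and emit one span per run, instead of deciding per character.
--     parts = []
--     prev = ''
--     rest = code
--     while rest:
--         cat = _cat(rest[0])
--         k = 0
--         while k < len(rest) and _cat(rest[k]) == cat:
--             k += 1
--         if prev in ('F', 'L', 'R', 'number'):
--             parts.append('</span>')
--         parts.append(get_color(cat) + rest[:k])
--         prev = cat
--         rest = rest[k:]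
--     parts.append('</span>')
--     return ''.join(parts)
-- ===== Notes on version B (the rewrite author's own statement) =====
-- stated objective: alternative
-- what changed: B splits the code into maximal runs of one category and emits one span per run (takeWhile/dropWhile-style), replacing A's per-character loop with a prev_cat same/different branch.
import Mathlib
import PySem

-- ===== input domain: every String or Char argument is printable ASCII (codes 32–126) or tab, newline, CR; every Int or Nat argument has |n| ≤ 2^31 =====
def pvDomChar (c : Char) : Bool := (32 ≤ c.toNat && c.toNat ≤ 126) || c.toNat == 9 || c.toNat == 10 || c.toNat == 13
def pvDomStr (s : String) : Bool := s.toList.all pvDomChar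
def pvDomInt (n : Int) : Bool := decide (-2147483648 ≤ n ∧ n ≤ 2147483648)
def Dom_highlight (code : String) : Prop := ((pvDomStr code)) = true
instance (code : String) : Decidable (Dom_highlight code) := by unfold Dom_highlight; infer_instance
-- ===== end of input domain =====

-- B replaces A's per-character loop with a run-based pass (one span per maximal
-- run of a category); same cost, different decomposition (objective: alternative).

-- ===== PORT A =====
-- shared helper: Python's get_color (identical in Source A and Source B)
def getColor (cat : List Char) : List Char :=
  if cat = "number".toList then "<span style=\"color: orange\">".toList
  else if cat = "F".toList then "<span style=\"color: pink\">".toList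
  else if cat = "L".toList then "<span style=\"color: red\">".toList
  else if cat = "R".toList then "<span style=\"color: green\">".toList
  else []

-- category of a character (Python strings as List Char)
def catOf (c : Char) : List Char :=
  if PySem.Chars.isdigit c then "number".toList else [c]

-- `output += "</span>"` guarded by `prev_cat in ['F','L','R','number']`
def closePrev (prev : List Char) : List Char :=
  if prev = "F".toList ∨ prev = "L".toList ∨ prev = "R".toList ∨ prev = "number".toList
  then "</span>".toList else []

-- one iteration of A's for-loop, state = (output, prev_cat)
def stepA (st : List Char × List Char) (c : Char) : List Char × List Char :=
  let cat := catOf c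
  if cat = st.2 then (st.1 ++ [c], cat)
  else (st.1 ++ closePrev st.2 ++ getColor cat ++ [c], cat)

def highlight (code : String) : String :=
  String.mk ((code.toList.foldl stepA ([], [])).1 ++ "</span>".toList)

-- ===== PORT B =====
-- Source B's while-loop: peel off the maximal run of the first character's category,
-- emit one span for it, recurse on the rest.
def highlightRuns : List Char → List Char → List Char
  | [], _ => "</span>".toList
  | c :: t, prev =>
    let cat := catOf c
    closePrev prev ++ getColor cat
      ++ (c :: t).takeWhile (fun x => catOf x == cat)
      ++ highlightRuns ((c :: t).dropWhile (fun x => catOf x == cat)) cat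
termination_by l _ => l.length
decreasing_by
  simp only [List.dropWhile_cons, beq_self_eq_true, if_true]
  exact Nat.lt_succ_of_le (List.length_dropWhile_le _ t)

def highlight_alt (code : String) : String :=
  String.mk (highlightRuns code.toList [])

-- ===== PRECONDITION & SPEC =====
def Spec_highlight (code : String) (out : String) : Prop := out = highlight_alt code
instance (code : String) (out : String) : Decidable (Spec_highlight code out) := by unfold Spec_highlight; infer_instance

-- ===== CLAIM (what is proved, stated in full; the proofs are below) =====
def Claim_equal_highlight : Prop := ∀ (code : String), Dom_highlight code → Spec_highlight code (highlight code)

-- ===== LEMMAS AND PROOFS =====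

-- accumulator-free form of A's loop body
def fA : List Char → List Char → List Char
  | [], _ => []
  | c :: t, prev =>
    let cat := catOf c
    (if cat = prev then [c] else closePrev prev ++ getColor cat ++ [c]) ++ fA t cat

theorem foldl_stepA (l : List Char) (out prev : List Char) :
    (l.foldl stepA (out, prev)).1 = out ++ fA l prev := by
  induction l generalizing out prev with
  | nil => simp [fA]
  | cons c t ih =>
    simp only [List.foldl_cons, stepA, fA]
    split_ifs with h <;> simp [ih, List.append_assoc]

-- a run of characters of category `cat` is absorbed by fA's same-category branch
theorem fA_run (t : List Char) (cat : List Char) :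
    fA t cat = t.takeWhile (fun x => catOf x == cat)
      ++ fA (t.dropWhile (fun x => catOf x == cat)) cat := by
  induction t with
  | nil => simp
  | cons h t ih =>
    by_cases hc : catOf h = cat
    · simp [fA, hc, ih]
    · simp [hc]

theorem head_dropWhile_cat (t : List Char) (cat : List Char) (c : Char)
    (h : ((t.dropWhile (fun x => catOf x == cat)).head? = some c)) : catOf c ≠ cat := by
  induction t with
  | nil => simp at h
  | cons a t ih =>
    rw [List.dropWhile_cons] at h
    by_cases ha : catOf a = cat
    · exact ih (by simpa [ha] using h)
    · simp [ha] at h; subst h; exact ha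

theorem fA_eq_runs (n : Nat) :
    ∀ (l prev : List Char), l.length ≤ n →
      (∀ c, l.head? = some c → catOf c ≠ prev) →
      fA l prev ++ "</span>".toList = highlightRuns l prev := by
  induction n with
  | zero =>
    intro l prev hl _
    have : l = [] := List.eq_nil_of_length_eq_zero (Nat.le_zero.mp hl)
    subst this; simp [fA, highlightRuns]
  | succ n ih =>
    intro l prev hl hhd
    match l with
    | [] => simp [fA, highlightRuns]
    | c :: t =>
      have hne : catOf c ≠ prev := hhd c rfl
      have hrest : (t.dropWhile (fun x => catOf x == catOf c)).length ≤ n := by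
        have := List.length_dropWhile_le (fun x => catOf x == catOf c) t
        simp at hl; omega
      have hih := ih (t.dropWhile (fun x => catOf x == catOf c)) (catOf c) hrest
        (fun c' hc' => head_dropWhile_cat t (catOf c) c' hc')
      rw [highlightRuns]
      simp only [List.takeWhile_cons, List.dropWhile_cons, beq_self_eq_true, if_true]
      rw [fA, fA_run t (catOf c)]
      simp [hne, ← hih, List.append_assoc]

theorem catOf_ne_nil (c : Char) : catOf c ≠ [] := by
  unfold catOf; split_ifs <;> simp

-- ===== VERDICT (by name: the statement is the Claim_ definition above) =====
theorem highlight_spec : Claim_equal_highlight := by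
  intro code _
  unfold Spec_highlight highlight highlight_alt
  rw [foldl_stepA, List.nil_append, fA_eq_runs code.toList.length code.toList [] le_rfl
    (fun c _ => catOf_ne_nil c)]
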